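-- pv_equiv track=rewrite | github.com/Jornvanbeek/agentbased | single_agent_planner.py | get_sum_of_cost
-- ===== SOURCE A (Python) =====
-- def get_sum_of_cost(paths):
--     rst = 0
--     wait = 0
--     for path in paths:
--
--         for i in range(1, len(path)):
--             if path[i] == path[i-1]:
--                 wait += 1
--                 continue
--             else:
--                 rst += 1
--         # rst += len(path) - 1
--     return [rst, wait]
-- ===== SOURCE B (Python) =====
-- def get_sum_of_cost(paths):
--     rst = 0
--     wait = 0
--     for path in paths:
--         # run-length compression: drop consecutive duplicates
--         compressed = []
--         for v in path:
--             if not compressed or compressed[-1] != v: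
--                 compressed.append(v)
--         if compressed:
--             rst += len(compressed) - 1
--         wait += len(path) - len(compressed)
--     return [rst, wait]
-- ===== Notes on version B (the rewrite author's own statement) =====
-- stated objective: alternative
-- what changed: B classifies no pairs at all: it run-length-compresses each path (dropping consecutive duplicates) and reads both counts off lengths - moves = len(compressed)-1 per nonempty path and waits = len(path)-len(compressed).
import Mathlib
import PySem

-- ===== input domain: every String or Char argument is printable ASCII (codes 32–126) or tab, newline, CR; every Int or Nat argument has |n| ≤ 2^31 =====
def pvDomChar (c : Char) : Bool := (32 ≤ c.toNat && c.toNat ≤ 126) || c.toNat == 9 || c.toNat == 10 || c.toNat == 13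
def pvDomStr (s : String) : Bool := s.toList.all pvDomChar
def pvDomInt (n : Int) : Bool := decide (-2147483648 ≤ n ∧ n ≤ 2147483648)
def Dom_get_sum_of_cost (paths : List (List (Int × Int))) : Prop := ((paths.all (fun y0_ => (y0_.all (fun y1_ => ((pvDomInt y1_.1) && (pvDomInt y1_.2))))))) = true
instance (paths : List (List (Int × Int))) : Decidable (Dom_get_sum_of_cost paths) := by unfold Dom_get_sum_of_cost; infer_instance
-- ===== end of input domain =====

-- B re-implements the count via run-length compression of each path (moves = compressed length - 1, waits = path length - compressed length) instead of A's per-pair classification (objective: alternative).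


-- ===== PORT A =====
-- inner loop body: for i in range(1, len(path)): if path[i] == path[i-1] then wait += 1 else rst += 1
def pvStepA (path : List (Int × Int)) (s : Int × Int) (i : Int) : Int × Int :=
  if PySem.List.pyGet? path i = PySem.List.pyGet? path (i - 1) then (s.1, s.2 + 1) else (s.1 + 1, s.2)

def get_sum_of_cost (paths : List (List (Int × Int))) : List Int :=
  let s := paths.foldl
    (fun s path => (PySem.List.pyRange 1 (path.length : Int) 1).foldl (pvStepA path) s)
    (0, 0)
  [s.1, s.2]

-- ===== PORT B =====
-- 'if not compressed or compressed[-1] != v: compressed.append(v)'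
def pvPush (acc : List (Int × Int)) (v : Int × Int) : List (Int × Int) :=
  if acc = [] ∨ acc.getLast? ≠ some v then acc ++ [v] else acc

def get_sum_of_cost_alt (paths : List (List (Int × Int))) : List Int :=
  let s := paths.foldl
    (fun s path =>
      let c := path.foldl pvPush []
      ((if c ≠ [] then s.1 + (c.length : Int) - 1 else s.1),
       s.2 + (path.length : Int) - (c.length : Int)))
    (0, 0)
  [s.1, s.2]

-- ===== PRECONDITION & SPEC =====
def Spec_get_sum_of_cost (paths : List (List (Int × Int))) (out : List Int) : Prop := out = get_sum_of_cost_alt paths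
instance (paths : List (List (Int × Int))) (out : List Int) : Decidable (Spec_get_sum_of_cost paths out) := by unfold Spec_get_sum_of_cost; infer_instance

-- ===== CLAIM (what is proved, stated in full; the proofs are below) =====
def Claim_equal_get_sum_of_cost : Prop := ∀ (paths : List (List (Int × Int))), Dom_get_sum_of_cost paths → Spec_get_sum_of_cost paths (get_sum_of_cost paths)

-- ===== LEMMAS AND PROOFS =====

-- number of consecutive changes in x :: t
def pvChg (x : Int × Int) : List (Int × Int) → Nat
  | [] => 0
  | y :: t => (if x = y then 0 else 1) + pvChg y t

-- A's inner loop over indices equals a fold over the list of consecutive pairs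
lemma pvInner_eq_zip (p : List (Int × Int)) (s : Int × Int) :
    (PySem.List.pyRange 1 (p.length : Int) 1).foldl (pvStepA p) s =
      (p.zip p.tail).foldl (fun s ab => if ab.1 = ab.2 then (s.1, s.2 + 1) else (s.1 + 1, s.2)) s := by
  induction p generalizing s with
  | nil => simp [PySem.List.pyRange_one_eq_nil]
  | cons x q ih =>
    cases q with
    | nil => simp [PySem.List.pyRange_one_eq_nil]
    | cons y r =>
      have hlen : (1 : Int) < ((x :: y :: r).length : Int) := by simp
      rw [PySem.List.pyRange_one_cons hlen]
      simp only [List.foldl_cons]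
      have e1 : PySem.List.pyGet? (x :: y :: r) 1 = some y := by
        have h10 : (1 : Int) = ((0 : Nat) : Int) + 1 := by norm_num
        rw [h10, PySem.List.pyGet?_cons_succ]
        simp
      have e0 : PySem.List.pyGet? (x :: y :: r) 0 = some x := PySem.List.pyGet?_zero_cons x (y :: r)
      have h1 : pvStepA (x :: y :: r) s 1 =
          (if (x = y) then (s.1, s.2 + 1) else (s.1 + 1, s.2)) := by
        unfold pvStepA
        norm_num [e1, e0]
        by_cases h : x = y
        · simp [h]
        · have h' : ¬ (y = x) := fun hh => h hh.symm
          simp [h, h']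
      rw [h1]
      have h12 : (1 : Int) + 1 = 2 := by norm_num
      rw [h12]
      have hshift :
          (PySem.List.pyRange 2 ((x :: y :: r).length : Int) 1).foldl (pvStepA (x :: y :: r))
            (if (x = y) then (s.1, s.2 + 1) else (s.1 + 1, s.2)) =
          (PySem.List.pyRange 1 ((y :: r).length : Int) 1).foldl (pvStepA (y :: r))
            (if (x = y) then (s.1, s.2 + 1) else (s.1 + 1, s.2)) := by
        have e2 : PySem.List.pyRange 2 ((x :: y :: r).length : Int) 1 =
            (List.range r.length).map (fun (k : Nat) => (2 : Int) + (k : Int)) := by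
          have hn : ((((x :: y :: r).length : Nat) : Int) - 2).toNat = r.length := by
            simp only [List.length_cons]
            omega
          rw [PySem.List.pyRange_one, hn]
        have e1' : PySem.List.pyRange 1 ((y :: r).length : Int) 1 =
            (List.range r.length).map (fun (k : Nat) => (1 : Int) + (k : Int)) := by
          have hn : ((((y :: r).length : Nat) : Int) - 1).toNat = r.length := by
            simp only [List.length_cons]
            omega
          rw [PySem.List.pyRange_one, hn]
        rw [e2, e1', List.foldl_map, List.foldl_map]
        apply PySem.List.foldl_congr_mem
        intro acc k _
        have g1 : PySem.List.pyGet? (x :: y :: r) ((2 : Int) + k) =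
            PySem.List.pyGet? (y :: r) (1 + k) := by
          have h2k : ((2 : Int) + k) = ((k + 1 : Nat) : Int) + 1 := by push_cast; ring
          rw [h2k, PySem.List.pyGet?_cons_succ]
          congr 1
          push_cast; ring
        have g2 : PySem.List.pyGet? (x :: y :: r) ((2 : Int) + k - 1) =
            PySem.List.pyGet? (y :: r) (1 + k - 1) := by
          have h2 : ((2 : Int) + k - 1) = ((k : Nat) : Int) + 1 := by ring
          rw [h2, PySem.List.pyGet?_cons_succ]
          congr 1
          ring
        simp only [pvStepA, g1, g2]
      rw [hshift, ih]
      simp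

-- the zip fold counts changes and non-changes
lemma pvZipFold (x : (Int × Int)) (t : List (Int × Int)) (s : Int × Int) :
    ((x :: t).zip t).foldl (fun s ab => if ab.1 = ab.2 then (s.1, s.2 + 1) else (s.1 + 1, s.2)) s =
      (s.1 + (pvChg x t : Int), s.2 + ((t.length : Int) - (pvChg x t : Int))) := by
  induction t generalizing x s with
  | nil => simp [pvChg]
  | cons y u ih =>
    simp only [List.zip_cons_cons, List.foldl_cons]
    by_cases h : x = y
    · rw [if_pos h, ih y]
      simp only [pvChg, if_pos h, List.length_cons, Prod.mk.injEq]
      constructor <;> push_cast <;> ring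
    · rw [if_neg h, ih y]
      simp only [pvChg, if_neg h, List.length_cons, Prod.mk.injEq]
      constructor <;> push_cast <;> ring

-- compression length: starting from a nonempty accumulator ending in x,
-- folding pvPush over t adds exactly pvChg x t elements
lemma pvCompFold (t : List (Int × Int)) : ∀ (acc : List (Int × Int)) (x : Int × Int),
    acc.getLast? = some x → (t.foldl pvPush acc).length = acc.length + pvChg x t := by
  induction t with
  | nil => intro acc x _; simp [pvChg]
  | cons y u ih =>
    intro acc x h
    have hne : acc ≠ [] := by intro hh; rw [hh] at h; simp at h
    simp only [List.foldl_cons]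
    by_cases hxy : x = y
    · have : pvPush acc y = acc := by
        unfold pvPush
        rw [if_neg]
        push Not
        exact ⟨hne, by rw [h, hxy]⟩
      rw [this, ih acc y (by rw [h, hxy])]
      simp [pvChg, hxy]
    · have : pvPush acc y = acc ++ [y] := by
        unfold pvPush
        rw [if_pos]
        right
        rw [h]
        simp only [ne_eq, Option.some.injEq]
        exact fun hh => hxy hh
      rw [this, ih (acc ++ [y]) y (by simp)]
      simp only [pvChg, if_neg hxy, List.length_append, List.length_cons, List.length_nil]
      omega

-- per path, A's inner loop performs exactly B's per-path update
lemma pvPerPath (p : List (Int × Int)) (s : Int × Int) :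
    (PySem.List.pyRange 1 (p.length : Int) 1).foldl (pvStepA p) s =
      ((if p.foldl pvPush [] ≠ [] then s.1 + ((p.foldl pvPush []).length : Int) - 1 else s.1),
       s.2 + (p.length : Int) - ((p.foldl pvPush []).length : Int)) := by
  cases p with
  | nil => simp [PySem.List.pyRange_one_eq_nil]
  | cons x t =>
    rw [pvInner_eq_zip]
    simp only [List.tail_cons]
    rw [pvZipFold]
    have hstart : pvPush [] x = [x] := by unfold pvPush; simp
    have hc : ((x :: t).foldl pvPush []).length = 1 + pvChg x t := by
      simp only [List.foldl_cons, hstart]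
      rw [pvCompFold t [x] x (by simp)]
      simp
    have hne : (x :: t).foldl pvPush [] ≠ [] := by
      intro hh
      rw [hh] at hc
      simp only [List.length_nil] at hc
      omega
    simp only [hne, if_pos, hc, List.length_cons, Prod.mk.injEq, ne_eq, not_false_eq_true]
    constructor <;> push_cast <;> ring

-- ===== VERDICT (by name: the statement is the Claim_ definition above) =====
theorem get_sum_of_cost_spec : Claim_equal_get_sum_of_cost := by
  intro paths _
  show _ = _
  unfold get_sum_of_cost get_sum_of_cost_alt
  have hstep : (fun (s : Int × Int) (path : List (Int × Int)) =>
      (PySem.List.pyRange 1 (path.length : Int) 1).foldl (pvStepA path) s) =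
      (fun (s : Int × Int) (path : List (Int × Int)) =>
        let c := path.foldl pvPush []
        ((if c ≠ [] then s.1 + (c.length : Int) - 1 else s.1),
         s.2 + (path.length : Int) - (c.length : Int))) := by
    funext s path
    exact pvPerPath path s
  rw [hstep]
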